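-- pv_equiv track=rewrite | github.com/alac/txt_to_dataset | library/few_shot_request.py | edit_few_shot_request
-- ===== SOURCE A (Python) =====
-- def edit_few_shot_request(prompt: str, remove_keys: list[str]) -> str:
--     all_examples = parse_few_shot_format(prompt)
--     result_lines = []
--     for index, example in enumerate(all_examples):
--         for key in example:
--             if key in remove_keys:
--                 continue
--             result_lines.append(f">{key}: " + example[key])
--         if index != len(all_examples) - 1:
--             result_lines.append("")  # the join will turn this into a blank line
--
--     return "\n".join(result_lines)
--
-- def parse_few_shot_format(prompt) -> list[dict]:
--     example = {}
--     all_examples = [example]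
--     last_key = None
--     for line in prompt.splitlines():
--         if len(line.strip()) == 0:
--             if len(example.keys()):
--                 example = {}
--                 all_examples.append(example)
--                 last_key = None
--         elif line.startswith(">") and ":" in line:
--             line = line[1:]
--             key, value = line.split(":", 1)
--             last_key = key.strip()
--             if value.startswith(" "):
--                 value = value[1:]
--             example[last_key] = value
--         elif last_key is not None:
--             example[last_key] += "\n" + line
--     all_examples = [d for d in all_examples if d]
--     return all_examples
-- ===== SOURCE B (Python) =====
-- def edit_few_shot_request(prompt: str, remove_keys: list[str]) -> str:
--     # Single streaming pass: parse and re-serialize each example as soon as it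
--     # closes, keeping the current example as an ordered (key, value) list.
--     out = []
--     cur = []            # ordered (key, value) pairs of the current example
--     last_key = None
--     started = False     # something was already emitted (for the blank separator)
--
--     def flush():
--         nonlocal started
--         if cur:
--             if started:
--                 out.append("")
--             out.extend(f">{k}: {v}" for k, v in cur if k not in remove_keys)
--             started = True
--
--     for line in prompt.splitlines():
--         if not line.strip():
--             flush()
--             cur = []
--             last_key = None
--         elif line.startswith(">") and ":" in line:
--             key, value = line[1:].split(":", 1)
--             last_key = key.strip()
--             if value.startswith(" "):
--                 value = value[1:]
--             for i, (k, _) in enumerate(cur):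
--                 if k == last_key:
--                     cur[i] = (k, value)
--                     break
--             else:
--                 cur.append((last_key, value))
--         elif last_key is not None:
--             for i, (k, v) in enumerate(cur):
--                 if k == last_key:
--                     cur[i] = (k, v + "\n" + line)
--                     break
--     flush()
--     return "\n".join(out)
-- ===== Notes on version B (the rewrite author's own statement) =====
-- stated objective: alternative
-- what changed: B replaces A's two-phase pipeline (build a list of dicts with parse_few_shot_format, filter empties, then an enumerate/index-arithmetic serialization loop) by a single streaming pass over the lines that keeps the current example as an ordered (key,value) list and flushes it (filtering removed keys and emitting the blank separator before each non-first block) as soon as the example closes.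
import Mathlib
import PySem

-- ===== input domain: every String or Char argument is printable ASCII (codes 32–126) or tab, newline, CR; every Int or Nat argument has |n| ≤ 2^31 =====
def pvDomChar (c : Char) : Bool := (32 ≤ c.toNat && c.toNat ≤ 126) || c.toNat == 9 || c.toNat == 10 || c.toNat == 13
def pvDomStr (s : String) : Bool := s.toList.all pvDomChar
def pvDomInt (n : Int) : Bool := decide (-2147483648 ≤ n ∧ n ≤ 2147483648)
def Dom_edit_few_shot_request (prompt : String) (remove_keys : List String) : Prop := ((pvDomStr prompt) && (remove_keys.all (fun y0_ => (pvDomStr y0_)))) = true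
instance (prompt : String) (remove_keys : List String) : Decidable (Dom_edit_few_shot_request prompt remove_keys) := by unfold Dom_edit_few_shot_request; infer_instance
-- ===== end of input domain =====

-- B replaces A's two-phase parse-into-dicts / enumerate-serialize pipeline by one streaming
-- pass over the lines that flushes each example (as an ordered assoc list) when it closes.

-- ===== PORT A =====

-- one iteration of parse_few_shot_format's loop; state = (completed examples, current example, last_key)
def pvAStep (st : List (PySem.Dict String String) × PySem.Dict String String × Option String)
    (line : String) : List (PySem.Dict String String) × PySem.Dict String String × Option String :=
  let (completed, ex, lastKey) := st
  if PySem.Str.len (PySem.Str.strip line) = 0 then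
    if ex.size ≠ 0 then (completed ++ [ex], PySem.Dict.empty, none)
    else (completed, ex, lastKey)
  else if PySem.Str.startswith line ">" && PySem.Str.isIn ":" line then
    match PySem.Str.splitMax? (PySem.Str.slice line (some 1) none) ":" 1 with
    | some [k, v] =>
        let lk := PySem.Str.strip k
        let v := if PySem.Str.startswith v " " then PySem.Str.slice v (some 1) none else v
        (completed, ex.insert lk v, some lk)
    | _ => (completed, ex, lastKey)           -- unreachable: split(":",1) with ":" present gives 2 parts
  else
    match lastKey with
    | some lk => (completed, ex.modify lk "" (fun w => w ++ "\n" ++ line), lastKey)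
    | none => (completed, ex, lastKey)

def parse_few_shot_format (prompt : String) : List (PySem.Dict String String) :=
  let st := (PySem.Str.splitlines prompt).foldl pvAStep ([], PySem.Dict.empty, none)
  (st.1 ++ [st.2.1]).filter (fun d => d.size != 0)

def edit_few_shot_request (prompt : String) (remove_keys : List String) : String :=
  let all_examples := parse_few_shot_format prompt
  let result_lines := (PySem.List.enumerate all_examples).foldl
    (fun acc p =>
      let acc := p.2.keys.foldl (fun acc key =>
        if remove_keys.contains key then acc
        else acc ++ [">" ++ key ++ ": " ++ p.2.getD key ""]) acc
      if p.1 ≠ (all_examples.length : Int) - 1 then acc ++ [""] else acc) []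
  PySem.Str.join "\n" result_lines

-- ===== PORT B =====

-- cur[i] = (k, value) for the first i with cur[i].1 = k, else append (the for/break/else loop)
def pvSetAssoc (cur : List (String × String)) (k v : String) : List (String × String) :=
  match cur with
  | [] => [(k, v)]
  | (k', v') :: t => if k' = k then (k', v) :: t else (k', v') :: pvSetAssoc t k v

-- cur[i] = (k, v + "\n" + line) for the first i with cur[i].1 = k (the continuation loop)
def pvAppendAssoc (cur : List (String × String)) (k line : String) : List (String × String) :=
  match cur with
  | [] => []
  | (k', v') :: t =>
      if k' = k then (k', v' ++ "\n" ++ line) :: t else (k', v') :: pvAppendAssoc t k line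

def pvSerialize (remove_keys : List String) (cur : List (String × String)) : List String :=
  (cur.filter (fun p => !(remove_keys.contains p.1))).map (fun p => ">" ++ p.1 ++ ": " ++ p.2)

def pvFlush (remove_keys : List String) (out : List String) (cur : List (String × String))
    (started : Bool) : List String × Bool :=
  if cur ≠ [] then
    ((if started then out ++ [""] else out) ++ pvSerialize remove_keys cur, true)
  else (out, started)

-- state = (out, cur, last_key, started)
def pvBStep (remove_keys : List String)
    (st : List String × List (String × String) × Option String × Bool) (line : String) :
    List String × List (String × String) × Option String × Bool :=
  let (out, cur, lastKey, started) := st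
  if PySem.Str.len (PySem.Str.strip line) = 0 then
    let fl := pvFlush remove_keys out cur started
    (fl.1, [], none, fl.2)
  else if PySem.Str.startswith line ">" && PySem.Str.isIn ":" line then
    match PySem.Str.splitMax? (PySem.Str.slice line (some 1) none) ":" 1 with
    | some [k, v] =>
        let lk := PySem.Str.strip k
        let v := if PySem.Str.startswith v " " then PySem.Str.slice v (some 1) none else v
        (out, pvSetAssoc cur lk v, some lk, started)
    | _ => (out, cur, lastKey, started)
  else
    match lastKey with
    | some lk => (out, pvAppendAssoc cur lk line, lastKey, started)
    | none => (out, cur, lastKey, started)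

def edit_few_shot_request_alt (prompt : String) (remove_keys : List String) : String :=
  let st := (PySem.Str.splitlines prompt).foldl (pvBStep remove_keys) ([], [], none, false)
  PySem.Str.join "\n" (pvFlush remove_keys st.1 st.2.1 st.2.2.2).1

-- ===== PRECONDITION & SPEC =====
def Spec_edit_few_shot_request (prompt : String) (remove_keys : List String) (out : String) : Prop := out = edit_few_shot_request_alt prompt remove_keys
instance (prompt : String) (remove_keys : List String) (out : String) : Decidable (Spec_edit_few_shot_request prompt remove_keys out) := by unfold Spec_edit_few_shot_request; infer_instance

-- ===== CLAIM (what is proved, stated in full; the proofs are below) =====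
def Claim_equal_edit_few_shot_request : Prop := ∀ (prompt : String) (remove_keys : List String), Dom_edit_few_shot_request prompt remove_keys → Spec_edit_few_shot_request prompt remove_keys (edit_few_shot_request prompt remove_keys)

-- ===== LEMMAS AND PROOFS =====

-- serialization of one example, A-style (over keys) and B-style (over items)
def pvSerKeys (rk : List String) (d : PySem.Dict String String) : List String :=
  (d.keys.filter (fun k => !(rk.contains k))).map (fun k => ">" ++ k ++ ": " ++ d.getD k "")

def pvSerD (rk : List String) (d : PySem.Dict String String) : List String :=
  pvSerialize rk d.items

-- canonical serialized lines of a list of (kept) examples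
def pvCanon (f : PySem.Dict String String → List String) :
    List (PySem.Dict String String) → List String
  | [] => []
  | e :: rest => f e ++ rest.flatMap (fun x => "" :: f x)

def pvKept (L : List (PySem.Dict String String)) : List (PySem.Dict String String) :=
  L.filter (fun d => d.size != 0)

-- the invariant tying A's parse state to B's streaming state
def pvInv (rk : List String)
    (stA : List (PySem.Dict String String) × PySem.Dict String String × Option String)
    (stB : List String × List (String × String) × Option String × Bool) : Prop :=
  stB.2.1 = stA.2.1.items ∧
  stB.2.2.1 = stA.2.2 ∧
  stA.2.1.keys.Nodup ∧
  (stA.2.1.size = 0 → stA.2.2 = none) ∧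
  (∀ k, stA.2.2 = some k → k ∈ stA.2.1.keys) ∧
  (∀ d ∈ stA.1, d.keys.Nodup) ∧
  stB.1 = pvCanon (pvSerD rk) (pvKept stA.1) ∧
  stB.2.2.2 = !(pvKept stA.1).isEmpty

theorem pvFlatMapSnd {α : Type} (g : α → List String) (K : List α) :
    ∀ s : Int, (PySem.List.enumerate K s).flatMap (fun p => g p.2) = K.flatMap g := by
  induction K with
  | nil => intro s; simp [PySem.List.enumerate_nil]
  | cons x xs ih => intro s; simp [PySem.List.enumerate_cons, ih]

theorem pvConsCanon (f : PySem.Dict String String → List String)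
    (b : PySem.Dict String String) (M : List (PySem.Dict String String)) :
    "" :: pvCanon f (b :: M) = (b :: M).flatMap (fun x => "" :: f x) := by
  simp [pvCanon]

theorem pvFlatCanon (f : PySem.Dict String String → List String)
    (K : List (PySem.Dict String String)) (e : PySem.Dict String String) :
    K.flatMap (fun x => f x ++ [""]) ++ f e = pvCanon f (K ++ [e]) := by
  induction K with
  | nil => simp [pvCanon]
  | cons a K' ih =>
      have h1 : ((a :: K').flatMap (fun x => f x ++ [""])) ++ f e
          = f a ++ ("" :: (K'.flatMap (fun x => f x ++ [""]) ++ f e)) := by simp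
      rw [h1, ih]
      rw [show (a :: K') ++ [e] = a :: (K' ++ [e]) from rfl]
      rcases hM : K' ++ [e] with _ | ⟨b, M⟩
      · simp at hM
      · rw [pvConsCanon]
        simp [pvCanon]

-- A's enumerate/index serialization loop produces the canonical block list
theorem pvEditLines (rk : List String) (L : List (PySem.Dict String String)) :
    (PySem.List.enumerate L).foldl
      (fun acc p =>
        let acc := p.2.keys.foldl (fun acc key =>
          if rk.contains key then acc
          else acc ++ [">" ++ key ++ ": " ++ p.2.getD key ""]) acc
        if p.1 ≠ (L.length : Int) - 1 then acc ++ [""] else acc) []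
    = pvCanon (pvSerKeys rk) L := by
  have hinner : ∀ (d : PySem.Dict String String) (acc : List String),
      d.keys.foldl (fun acc key =>
        if rk.contains key then acc
        else acc ++ [">" ++ key ++ ": " ++ d.getD key ""]) acc = acc ++ pvSerKeys rk d := by
    intro d acc
    have heq : (fun (acc : List String) (key : String) =>
        if rk.contains key then acc
        else acc ++ [">" ++ key ++ ": " ++ d.getD key ""])
        = (fun acc key => if (!(rk.contains key)) = true
            then acc ++ [">" ++ key ++ ": " ++ d.getD key ""] else acc) := by
      funext acc key; cases rk.contains key <;> simp only [Bool.not_true, Bool.not_false, if_true, if_false, Bool.false_eq_true]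
    rw [heq, PySem.List.foldl_append_if]
    rfl
  have hfun : (fun (acc : List String) (p : Int × PySem.Dict String String) =>
        let acc := p.2.keys.foldl (fun acc key =>
          if rk.contains key then acc
          else acc ++ [">" ++ key ++ ": " ++ p.2.getD key ""]) acc
        if p.1 ≠ (L.length : Int) - 1 then acc ++ [""] else acc)
      = (fun acc p => acc ++ (pvSerKeys rk p.2 ++ if p.1 ≠ (L.length : Int) - 1 then [""] else [])) := by
    funext acc p
    simp only [hinner]
    split <;> simp
  rw [hfun, PySem.List.foldl_append_eq_flatMap, List.nil_append]
  induction L using List.reverseRecOn with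
  | nil => simp [PySem.List.enumerate_nil, pvCanon]
  | append_singleton K e _ =>
      rw [PySem.List.enumerate_append, List.flatMap_append]
      have hK : (PySem.List.enumerate K 0).flatMap
          (fun p => pvSerKeys rk p.2 ++ (if p.1 ≠ ((K ++ [e]).length : Int) - 1 then [""] else []))
          = K.flatMap (fun x => pvSerKeys rk x ++ [""]) := by
        have hcg : ∀ p ∈ PySem.List.enumerate K 0,
            (pvSerKeys rk p.2 ++ (if p.1 ≠ ((K ++ [e]).length : Int) - 1 then [""] else []))
            = pvSerKeys rk p.2 ++ [""] := by
          intro p hp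
          rcases (PySem.List.mem_enumerate_iff _ _ _).1 hp with ⟨k, hk, rfl⟩
          have hc : ((0 : Int) + (k : Int)) ≠ ((K ++ [e]).length : Int) - 1 := by
            simp only [List.length_append, List.length_cons, List.length_nil]
            push_cast
            omega
          rw [if_pos hc]
        rw [List.flatMap_congr hcg]
        exact pvFlatMapSnd (fun x => pvSerKeys rk x ++ [""]) K 0
      rw [hK]
      simp only [PySem.List.enumerate_cons, PySem.List.enumerate_nil, List.flatMap_cons,
        List.flatMap_nil, List.append_nil]
      have hc2 : ¬ (((0 : Int) + (K.length : Int)) ≠ ((K ++ [e]).length : Int) - 1) := by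
        simp only [List.length_append, List.length_cons, List.length_nil]
        push_cast
        omega
      rw [if_neg hc2, List.append_nil]
      exact pvFlatCanon (pvSerKeys rk) K e

-- the two per-example serializations agree on nodup keys
theorem pvCanon_congr (rk : List String) (K : List (PySem.Dict String String))
    (h : ∀ d ∈ K, d.keys.Nodup) : pvCanon (pvSerKeys rk) K = pvCanon (pvSerD rk) K := by
  have hser : ∀ d ∈ K, pvSerKeys rk d = pvSerD rk d := by
    intro d hd
    have hnd := h d hd
    rw [pvSerD, pvSerialize, PySem.Dict.items_eq_map_keys d hnd ""]
    rw [List.filter_map, List.map_map]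
    rfl
  cases K with
  | nil => rfl
  | cons a K' =>
      simp only [pvCanon]
      rw [hser a (by simp), List.flatMap_congr
        (fun x hx => by rw [hser x (List.mem_cons_of_mem _ hx)])]

theorem pvMapId (k' : String) (w : String × String)
    (t : List (String × String)) (hnt : k' ∉ t.map Prod.fst) :
    t.map (fun p : String × String => if p.1 = k' then w else p) = t := by
  induction t with
  | nil => rfl
  | cons q t ih =>
      simp only [List.map_cons, List.mem_cons, List.map_cons, not_or] at hnt ⊢
      have hne : q.1 ≠ k' := fun h => hnt.1 h.symm
      rw [if_neg hne, ih hnt.2]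

theorem pvSetAssoc_notMem (k v : String) :
    ∀ (l : List (String × String)), k ∉ l.map Prod.fst → pvSetAssoc l k v = l ++ [(k, v)] := by
  intro l
  induction l with
  | nil => intro _; rfl
  | cons p t ih =>
      intro h
      obtain ⟨k', v'⟩ := p
      simp only [List.map_cons, List.mem_cons, not_or] at h
      have hne : k' ≠ k := fun he => h.1 he.symm
      simp only [pvSetAssoc, if_neg hne, ih h.2, List.cons_append]

theorem pvSetAssoc_mem (k v : String) :
    ∀ (l : List (String × String)), (l.map Prod.fst).Nodup → k ∈ l.map Prod.fst →
      pvSetAssoc l k v = l.map (fun p => if p.1 == k then (k, v) else p) := by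
  intro l
  induction l with
  | nil => intro _ h; simp at h
  | cons p t ih =>
      intro hn hm
      obtain ⟨k', v'⟩ := p
      simp only [List.map_cons, List.nodup_cons] at hn
      by_cases he : k' = k
      · subst he
        simp [pvSetAssoc, pvMapId k' (k', v) t hn.1]
      · have hm' : k ∈ t.map Prod.fst := by
          rcases List.mem_cons.1 hm with h | h
          · exact absurd h.symm he
          · exact h
        simp only [pvSetAssoc, if_neg he, List.map_cons, ih hn.2 hm']
        simp [show (k' == k) = false from by simp [he]]

theorem pvAppendAssoc_mem (k s v0 : String) :
    ∀ (l : List (String × String)), (l.map Prod.fst).Nodup → (k, v0) ∈ l →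
      pvAppendAssoc l k s = l.map (fun p => if p.1 == k then (k, v0 ++ "\n" ++ s) else p) := by
  intro l
  induction l with
  | nil => intro _ h; simp at h
  | cons p t ih =>
      intro hn hm
      obtain ⟨k', v'⟩ := p
      simp only [List.map_cons, List.nodup_cons] at hn
      by_cases he : k' = k
      · subst he
        have hv : v0 = v' := by
          rcases List.mem_cons.1 hm with h | h
          · simp only [Prod.mk.injEq] at h
            exact h.2
          · exact absurd (List.mem_map_of_mem (f := Prod.fst) h) hn.1
        subst hv
        simp [pvAppendAssoc, pvMapId k' (k', v0 ++ "\n" ++ s) t hn.1]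
      · have hm' : (k, v0) ∈ t := by
          rcases List.mem_cons.1 hm with h | h
          · exact absurd (congrArg Prod.fst h).symm he
          · exact h
        simp only [pvAppendAssoc, if_neg he, List.map_cons, ih hn.2 hm']
        simp [show (k' == k) = false from by simp [he]]

theorem pvKeys_eq (d : PySem.Dict String String) : d.keys = d.items.map Prod.fst := rfl

-- B's in-place assoc update is A's dict insert
theorem pvSetAssoc_items (d : PySem.Dict String String) (k v : String)
    (hn : d.keys.Nodup) : pvSetAssoc d.items k v = (d.insert k v).items := by
  by_cases hc : d.contains k = true
  · rw [PySem.Dict.items_insert_of_contains d v hc]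
    exact pvSetAssoc_mem k v d.items (pvKeys_eq d ▸ hn)
      (by rw [← pvKeys_eq]; exact (PySem.Dict.contains_iff_mem_keys _ _).1 hc)
  · rw [PySem.Dict.items_insert_of_not_contains d v (by simpa using hc)]
    refine pvSetAssoc_notMem k v d.items ?_
    rw [← pvKeys_eq]
    exact fun hm => hc ((PySem.Dict.contains_iff_mem_keys _ _).2 hm)

-- B's in-place continuation append is A's dict value update
theorem pvAppendAssoc_items (d : PySem.Dict String String) (k s : String)
    (hn : d.keys.Nodup) (hk : k ∈ d.keys) :
    pvAppendAssoc d.items k s = (d.insert k (d.getD k "" ++ "\n" ++ s)).items := by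
  have hc : d.contains k = true := (PySem.Dict.contains_iff_mem_keys _ _).2 hk
  have hsome : ∃ v0, d.get? k = some v0 := by
    rcases h : d.get? k with _ | v0
    · exact absurd ((PySem.Dict.get?_eq_none_iff_not_mem_keys _ _).1 h) (by simpa using hk)
    · exact ⟨v0, rfl⟩
  obtain ⟨v0, hv0⟩ := hsome
  have hgd : d.getD k "" = v0 := PySem.Dict.getD_of_get?_eq_some d "" hv0
  have hmem : (k, v0) ∈ d.items := PySem.Dict.mem_items_of_get?_eq_some d hv0
  rw [PySem.Dict.items_insert_of_contains d _ hc, hgd]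
  exact pvAppendAssoc_mem k s v0 d.items (pvKeys_eq d ▸ hn) hmem

theorem pvSize_zero_iff (d : PySem.Dict String String) : d.size = 0 ↔ d.items = [] := by
  rw [show d.size = d.items.length from rfl]
  exact List.length_eq_zero_iff

theorem pvInsert_items_ne_nil (d : PySem.Dict String String) (k v : String) :
    (d.insert k v).items ≠ [] := by
  by_cases hc : d.contains k = true
  · rw [PySem.Dict.items_insert_of_contains d v hc]
    intro h
    have hk : k ∈ d.keys := (PySem.Dict.contains_iff_mem_keys _ _).1 hc
    rw [pvKeys_eq] at hk
    rcases List.exists_of_mem_map hk with ⟨p, hp, _⟩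
    exact absurd (h ▸ List.mem_map_of_mem hp :
      (fun p : String × String => if (p.1 == k) = true then (k, v) else p) p ∈ ([] : List (String × String))) (by simp)
  · rw [PySem.Dict.items_insert_of_not_contains d v (by simpa using hc)]
    simp

theorem pvKept_append_pos (C : List (PySem.Dict String String))
    (ex : PySem.Dict String String) (h : ex.size ≠ 0) : pvKept (C ++ [ex]) = pvKept C ++ [ex] := by
  rw [pvKept, List.filter_append, pvKept]
  simp [h]

theorem pvKept_append_zero (C : List (PySem.Dict String String))
    (ex : PySem.Dict String String) (h : ex.size = 0) : pvKept (C ++ [ex]) = pvKept C := by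
  rw [pvKept, List.filter_append, pvKept]
  simp [h]

-- flushing the current example advances the canonical output by exactly one kept block
theorem pvFlushCanon (rk : List String) (C : List (PySem.Dict String String))
    (ex : PySem.Dict String String) :
    pvFlush rk (pvCanon (pvSerD rk) (pvKept C)) ex.items (!(pvKept C).isEmpty)
      = (pvCanon (pvSerD rk) (pvKept (C ++ [ex])), !(pvKept (C ++ [ex])).isEmpty) := by
  by_cases hz : ex.size = 0
  · have hnil : ex.items = [] := (pvSize_zero_iff ex).1 hz
    rw [pvFlush, if_neg (by simp [hnil]), pvKept_append_zero C ex hz]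
  · have hnil : ex.items ≠ [] := fun h => hz ((pvSize_zero_iff ex).2 h)
    rw [pvFlush, if_pos hnil, pvKept_append_pos C ex hz]
    have hcanon : pvCanon (pvSerD rk) (pvKept C ++ [ex])
        = (if (pvKept C).isEmpty then [] else pvCanon (pvSerD rk) (pvKept C) ++ [""])
          ++ pvSerD rk ex := by
      cases hK : pvKept C with
      | nil => simp [pvCanon]
      | cons a K' =>
          simp only [List.cons_append, pvCanon, List.flatMap_append, List.isEmpty_cons]
          simp
    rw [hcanon]
    cases hK : (pvKept C).isEmpty
    · simp [pvSerD, Prod.ext_iff]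
    · rw [List.isEmpty_iff] at hK
      simp [hK, pvCanon, pvSerD]

-- one line preserves the invariant
set_option maxHeartbeats 1000000 in
theorem pvInv_step (rk : List String) (line : String) (stA) (stB)
    (h : pvInv rk stA stB) : pvInv rk (pvAStep stA line) (pvBStep rk stB line) := by
  obtain ⟨C, ex, lk⟩ := stA
  obtain ⟨out, cur, lkB, started⟩ := stB
  obtain ⟨hcur, hlk, hnd, hz, hmem, hC, hout, hst⟩ := h
  simp only at hcur hlk hnd hz hmem hC hout hst
  subst hcur hlk hout hst
  simp only [pvAStep.eq_def, pvBStep.eq_def]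
  by_cases h1 : PySem.Str.len (PySem.Str.strip line) = 0
  · rw [if_pos h1, if_pos h1]
    by_cases h2 : ex.size = 0
    · have hnil : ex.items = [] := (pvSize_zero_iff ex).1 h2
      rw [if_neg (by simpa using h2)]
      rw [pvFlushCanon rk C ex, pvKept_append_zero C ex h2]
      exact ⟨by simp [hnil], by simp [hz h2], hnd, hz, hmem, hC, rfl, rfl⟩
    · rw [if_pos h2]
      rw [pvFlushCanon rk C ex]
      refine ⟨rfl, rfl, by simp [List.Nodup], by simp, by simp, ?_, rfl, rfl⟩
      intro d hd
      rcases List.mem_append.1 hd with h | h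
      · exact hC d h
      · rw [List.mem_singleton.1 h]
        exact hnd
  · rw [if_neg h1, if_neg h1]
    by_cases h2 : (PySem.Str.startswith line ">" && PySem.Str.isIn ":" line) = true
    · rw [if_pos h2, if_pos h2]
      rcases hsp : PySem.Str.splitMax? (PySem.Str.slice line (some 1) none) ":" 1 with _ | l
      · exact ⟨rfl, rfl, hnd, hz, hmem, hC, rfl, rfl⟩
      · rcases l with _ | ⟨k0, l⟩
        · exact ⟨rfl, rfl, hnd, hz, hmem, hC, rfl, rfl⟩
        rcases l with _ | ⟨v0, l⟩
        · exact ⟨rfl, rfl, hnd, hz, hmem, hC, rfl, rfl⟩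
        rcases l with _ | ⟨w0, l⟩
        · refine ⟨pvSetAssoc_items ex _ _ hnd, rfl,
            PySem.Dict.nodup_keys_insert ex _ _ hnd, ?_, ?_, hC, rfl, rfl⟩
          · intro hsz
            exact absurd ((pvSize_zero_iff _).1 hsz) (pvInsert_items_ne_nil ex _ _)
          · intro k hk
            cases hk
            exact (PySem.Dict.mem_keys_insert _ _ _ _).2 (Or.inl rfl)
        · exact ⟨rfl, rfl, hnd, hz, hmem, hC, rfl, rfl⟩
    · rw [if_neg h2, if_neg h2]
      cases lkB with
      | none => exact ⟨rfl, rfl, hnd, hz, hmem, hC, rfl, rfl⟩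
      | some k =>
          have hk : k ∈ ex.keys := hmem k rfl
          refine ⟨pvAppendAssoc_items ex k line hnd hk, rfl,
            PySem.Dict.nodup_keys_insert ex _ _ hnd, ?_, ?_, hC, rfl, rfl⟩
          · intro hsz
            exact absurd ((pvSize_zero_iff _).1 hsz) (pvInsert_items_ne_nil ex _ _)
          · intro k' hk'
            cases hk'
            exact (PySem.Dict.mem_keys_insert _ _ _ _).2 (Or.inl rfl)

set_option maxHeartbeats 1000000 in
theorem pvInv_fold (rk : List String) (lines : List String) :
    ∀ stA stB, pvInv rk stA stB →
      pvInv rk (lines.foldl pvAStep stA) (lines.foldl (pvBStep rk) stB) := by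
  induction lines with
  | nil => intro stA stB h; exact h
  | cons line rest ih =>
      intro stA stB h
      exact ih _ _ (pvInv_step rk line stA stB h)

-- ===== VERDICT (by name: the statement is the Claim_ definition above) =====
theorem edit_few_shot_request_spec : Claim_equal_edit_few_shot_request := by
  intro prompt rk _
  unfold Spec_edit_few_shot_request edit_few_shot_request edit_few_shot_request_alt
    parse_few_shot_format
  have hInit : pvInv rk ([], PySem.Dict.empty, none) ([], [], none, false) := by
    unfold pvInv
    refine ⟨rfl, rfl, PySem.Dict.nodup_keys_empty, fun _ => rfl, ?_, ?_, rfl, rfl⟩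
    · intro k hk
      simp at hk
    · intro d hd
      simp at hd
  have hInv := pvInv_fold rk (PySem.Str.splitlines prompt) _ _ hInit
  rcases hA : (PySem.Str.splitlines prompt).foldl pvAStep ([], PySem.Dict.empty, none)
    with ⟨C, ex, lk⟩
  rcases hB : (PySem.Str.splitlines prompt).foldl (pvBStep rk) ([], [], none, false)
    with ⟨out, cur, lkB, started⟩
  rw [hA, hB] at hInv
  obtain ⟨hcur, hlk, hnd, hz, hmem, hC, hout, hst⟩ := hInv
  simp only at hcur hlk hnd hz hmem hC hout hst
  simp only []
  have hkept : ((C, ex, lk).1 ++ [(C, ex, lk).2.1]).filter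
      (fun d => d.size != 0) = pvKept (C ++ [ex]) := rfl
  rw [hkept]
  rw [pvEditLines rk (pvKept (C ++ [ex]))]
  rw [pvCanon_congr rk (pvKept (C ++ [ex])) ?_]
  · subst hcur hout hst
    rw [show ((C, ex, lk).2.1 : PySem.Dict String String) = ex from rfl] at *
    have hfl := pvFlushCanon rk C ex
    rw [show (pvFlush rk (pvCanon (pvSerD rk) (pvKept C)) ex.items (!(pvKept C).isEmpty)).1
      = pvCanon (pvSerD rk) (pvKept (C ++ [ex])) from by rw [hfl]]
  · intro d hd
    rcases List.mem_append.1 (List.mem_of_mem_filter hd) with h | h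
    · exact hC d h
    · rw [List.mem_singleton.1 h]
      exact hnd
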